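-- pv_equiv track=rewrite | github.com/Cristian-Emil/Fact_Diverse1 | lab2.py | detLongestSequence
-- ===== SOURCE A (Python) =====
-- def isInRange(x, a, b):
--     '''
--         The function checks if x is in range [a, b]
--         I data:The number a and the limits of the range a and b
--         O data:Returns True if x is in range [a, b]
--                 False if it isn't
--     '''
--     if x >= a and x <= b:
--         return True
--     else:
--         return False
--
-- def detLongestSequence(l):
--     '''
--         Returns a list containing the longest sequence
--         whith elements in rang [0, 10]
--     '''
--
--     max = 0
--     max_start = 0
--     max_end = 0
--     pos_start = 0
--     pos_end = 0
--
--     for i in range(len(l)):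
--         if isInRange(l[i], 0, 10):
--             if pos_start == pos_end:
--                 pos_start = i
--                 pos_end = i + 1
--             else:
--                 pos_end = pos_end + 1
--
--         if not isInRange(l[i], 0, 10):
--             if pos_end - pos_start > max_end - max_start:
--                 max_start = pos_start
--                 max_end = pos_end
--             pos_start = pos_end
--
--     if pos_end - pos_start > max_end - max_start:
--         max_start = pos_start
--         max_end = pos_end
--
--     return l[max_start : max_end]
-- ===== SOURCE B (Python) =====
-- def detLongestSequence(l):
--     '''
--         Returns a list containing the longest sequence
--         with elements in range [0, 10]
--     '''
--     runs = []
--     cur = []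
--     for x in l:
--         if 0 <= x <= 10:
--             cur.append(x)
--         else:
--             if cur:
--                 runs.append(cur)
--                 cur = []
--     if cur:
--         runs.append(cur)
--     best = []
--     for r in runs:
--         if len(r) > len(best):
--             best = r
--     return best
-- ===== Notes on version B (the rewrite author's own statement) =====
-- stated objective: simpler
-- what changed: A tracks four index counters (max_start/max_end/pos_start/pos_end) over range(len(l)) with a per-element isInRange helper call and returns a slice; B partitions l into its maximal in-range runs as actual sublists in one direct pass and then picks the first strictly longest run, with no index arithmetic, helper calls or slicing.
import Mathlib
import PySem

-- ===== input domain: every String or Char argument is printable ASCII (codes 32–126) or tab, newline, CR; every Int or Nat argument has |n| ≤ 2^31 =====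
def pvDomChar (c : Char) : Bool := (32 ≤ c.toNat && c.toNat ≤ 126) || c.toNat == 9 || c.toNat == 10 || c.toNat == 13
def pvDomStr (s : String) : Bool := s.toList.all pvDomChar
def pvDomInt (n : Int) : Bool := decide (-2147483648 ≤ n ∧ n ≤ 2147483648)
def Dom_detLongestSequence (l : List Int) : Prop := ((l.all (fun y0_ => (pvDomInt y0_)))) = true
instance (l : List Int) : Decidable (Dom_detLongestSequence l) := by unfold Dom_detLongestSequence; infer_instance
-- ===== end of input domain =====

-- B replaces A's four index counters by collecting the maximal in-range runs as lists and
-- picking the first longest one (objective: simpler; same O(n) cost).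

-- ===== PORT A =====
def isInRange (x a b : Int) : Bool :=
  if x ≥ a ∧ x ≤ b then true else false

-- state = (max_start, max_end, pos_start, pos_end); the unused Python variable `max` is dropped
def aStep (l : List Int) (st : Int × Int × Int × Int) (i : Int) : Int × Int × Int × Int :=
  -- l[i]; i ranges over range(len(l)) so the access never raises (pyGetD is exact here)
  let x := PySem.List.pyGetD l i 0
  let st1 :=
    if isInRange x 0 10 then
      (if st.2.2.1 = st.2.2.2 then (st.1, st.2.1, i, i + 1)
       else (st.1, st.2.1, st.2.2.1, st.2.2.2 + 1))
    else st
  if ¬ isInRange x 0 10 then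
    (if st1.2.2.2 - st1.2.2.1 > st1.2.1 - st1.1 then
       (st1.2.2.1, st1.2.2.2, st1.2.2.2, st1.2.2.2)
     else (st1.1, st1.2.1, st1.2.2.2, st1.2.2.2))
  else st1

def detLongestSequence (l : List Int) : List Int :=
  let st := (PySem.List.pyRange 0 (l.length : Int) 1).foldl (aStep l) (0, 0, 0, 0)
  let fin := if st.2.2.2 - st.2.2.1 > st.2.1 - st.1 then (st.2.2.1, st.2.2.2) else (st.1, st.2.1)
  PySem.List.slice l (some fin.1) (some fin.2)

-- ===== PORT B =====
def bStep (p : List (List Int) × List Int) (x : Int) : List (List Int) × List Int :=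
  if 0 ≤ x ∧ x ≤ 10 then (p.1, p.2 ++ [x])
  else if p.2 ≠ [] then (p.1 ++ [p.2], []) else p

def bestRun (rs : List (List Int)) : List Int :=
  rs.foldl (fun best r => if r.length > best.length then r else best) []

def detLongestSequence_alt (l : List Int) : List Int :=
  let p := l.foldl bStep ([], [])
  bestRun (if p.2 ≠ [] then p.1 ++ [p.2] else p.1)

-- ===== PRECONDITION & SPEC =====
def Spec_detLongestSequence (l : List Int) (out : List Int) : Prop := out = detLongestSequence_alt l
instance (l : List Int) (out : List Int) : Decidable (Spec_detLongestSequence l out) := by unfold Spec_detLongestSequence; infer_instance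

-- ===== CLAIM (what is proved, stated in full; the proofs are below) =====
def Claim_equal_detLongestSequence : Prop := ∀ (l : List Int), Dom_detLongestSequence l → Spec_detLongestSequence l (detLongestSequence l)

-- ===== LEMMAS AND PROOFS =====

-- the contiguous segment l[a:b] for nonnegative Int bounds, drop/take form
def seg (l : List Int) (a b : Int) : List Int := (l.drop a.toNat).take (b.toNat - a.toNat)

theorem seg_self (l : List Int) (a : Int) : seg l a a = [] := by
  simp [seg]

theorem seg_snoc (l : List Int) (a : Int) (k : Nat) (ha : 0 ≤ a) (hak : a ≤ (k : Int))
    (hk : k < l.length) :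
    seg l a ((k : Int) + 1) = seg l a (k : Int) ++ [l[k]] := by
  have h1 : ((k : Int) + 1).toNat = k + 1 := by omega
  have h2 : ((k : Int)).toNat = k := by omega
  have h3 : a.toNat ≤ k := by omega
  simp only [seg, h1, h2]
  have h4 : k + 1 - a.toNat = (k - a.toNat) + 1 := by omega
  rw [h4, List.take_add_one]
  congr 1
  have : (l.drop a.toNat)[k - a.toNat]? = l[k]? := by
    rw [List.getElem?_drop]
    congr 1; omega
  rw [this, List.getElem?_eq_getElem hk]
  rfl

theorem bestRun_snoc (rs : List (List Int)) (r : List Int) :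
    bestRun (rs ++ [r]) = if r.length > (bestRun rs).length then r else bestRun rs := by
  simp [bestRun]

-- the loop invariant tying A's index state to B's runs/current-run state after k steps
theorem inv (l : List Int) (k : Nat) (hk : k ≤ l.length) :
    (let st := (PySem.List.pyRange 0 (k : Int) 1).foldl (aStep l) (0, 0, 0, 0)
     let p := (l.take k).foldl bStep ([], [])
     0 ≤ st.1 ∧ st.1 ≤ st.2.1 ∧ st.2.1 ≤ (k : Int) ∧
     0 ≤ st.2.2.1 ∧ st.2.2.1 ≤ st.2.2.2 ∧ st.2.2.2 ≤ (k : Int) ∧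
     seg l st.2.2.1 st.2.2.2 = p.2 ∧
     st.2.2.2 - st.2.2.1 = (p.2.length : Int) ∧
     (p.2 ≠ [] → st.2.2.2 = (k : Int)) ∧
     seg l st.1 st.2.1 = bestRun p.1 ∧
     st.2.1 - st.1 = ((bestRun p.1).length : Int)) := by
  induction k with
  | zero =>
      simp [PySem.List.pyRange, bestRun, seg]
  | succ k ih =>
      have hk' : k < l.length := by omega
      have ih := ih (by omega)
      have hrange : PySem.List.pyRange 0 ((k + 1 : Nat) : Int) 1
          = PySem.List.pyRange 0 (k : Int) 1 ++ [(k : Int)] := by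
        push_cast
        rw [PySem.List.pyRange_one_succ_right (by omega)]
      have htake : l.take (k + 1) = l.take k ++ [l[k]] := by
        rw [List.take_add_one, List.getElem?_eq_getElem hk']
        rfl
      rw [hrange, htake, List.foldl_append, List.foldl_append]
      simp only [List.foldl_cons, List.foldl_nil]
      set st := (PySem.List.pyRange 0 (k : Int) 1).foldl (aStep l) (0, 0, 0, 0) with hst
      set p := (l.take k).foldl bStep ([], []) with hp
      obtain ⟨h1, h2, h3, h4, h5, h6, hseg, hlen, hpend, hbseg, hblen⟩ := ih
      have hx : PySem.List.pyGetD l (k : Int) 0 = l[k] := by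
        rw [PySem.List.pyGetD_natCast]
        simp [List.getD_eq_getElem?_getD, List.getElem?_eq_getElem hk']
      by_cases hin : 0 ≤ l[k] ∧ l[k] ≤ 10
      · -- in-range element: A extends/starts the run, B extends cur
        have hinr : isInRange l[k] 0 10 = true := by
          simp [isInRange, hin.1, hin.2]
        have hb : bStep p l[k] = (p.1, p.2 ++ [l[k]]) := by
          simp [bStep, hin]
        by_cases hps : st.2.2.1 = st.2.2.2
        · -- empty current run: cur = []
          have hcur : p.2 = [] := by
            have : (p.2.length : Int) = 0 := by omega
            simpa using this
          have ha : aStep l st (k : Int) = (st.1, st.2.1, (k : Int), (k : Int) + 1) := by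
            simp [aStep, hx, hinr, hps]
          rw [ha, hb]
          dsimp only
          refine ⟨h1, h2, by push_cast; omega, by omega, by omega, by push_cast; omega, ?_, ?_, ?_, hbseg, hblen⟩
          · rw [seg_snoc l (k : Int) k (by omega) le_rfl hk', seg_self]
            simp [hcur]
          · simp [hcur]
          · intro _; push_cast; omega
        · -- nonempty current run: pe = k, cur ≠ []
          have hcurne : p.2 ≠ [] := by
            intro h
            rw [h] at hlen
            simp at hlen
            omega
          have hpe : st.2.2.2 = (k : Int) := hpend hcurne
          have ha : aStep l st (k : Int) = (st.1, st.2.1, st.2.2.1, st.2.2.2 + 1) := by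
            simp [aStep, hx, hinr, hps]
          rw [ha, hb]
          dsimp only
          refine ⟨h1, h2, by push_cast; omega, by omega, by omega, by push_cast; omega, ?_, ?_, ?_, hbseg, hblen⟩
          · have : st.2.2.2 + 1 = (k : Int) + 1 := by omega
            rw [this, seg_snoc l st.2.2.1 k h4 (by omega) hk', ← hpe, hseg]
          · simp; omega
          · intro _; rw [hpe]; push_cast; ring
      · -- out-of-range element: A closes the run, B flushes cur into runs
        have hinr : isInRange l[k] 0 10 = false := by
          simp only [isInRange]
          rw [if_neg]
          · intro h; exact hin ⟨h.1, h.2⟩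
        by_cases hcur : p.2 = []
        · -- nothing pending: lengths equal 0, no update on either side
          have hps : st.2.2.1 = st.2.2.2 := by
            have : (p.2.length : Int) = 0 := by simp [hcur]
            omega
          have hb : bStep p l[k] = p := by
            simp [bStep, hin, hcur]
          have ha : aStep l st (k : Int) = (st.1, st.2.1, st.2.2.2, st.2.2.2) := by
            have hnogt : ¬ (st.2.2.2 - st.2.2.1 > st.2.1 - st.1) := by omega
            simp [aStep, hx, hinr, hnogt]
          rw [ha, hb]
          dsimp only
          exact ⟨h1, h2, by push_cast; omega, by omega, le_rfl, by push_cast; omega,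
            by rw [seg_self, hcur], by simp [hcur], fun h => absurd hcur h, hbseg, hblen⟩
        · have hb : bStep p l[k] = (p.1 ++ [p.2], []) := by
            simp [bStep, hin, hcur]
          rw [hb, bestRun_snoc]
          dsimp only
          by_cases hgt : st.2.2.2 - st.2.2.1 > st.2.1 - st.1
          · have hgt' : p.2.length > (bestRun p.1).length := by omega
            have ha : aStep l st (k : Int) = (st.2.2.1, st.2.2.2, st.2.2.2, st.2.2.2) := by
              simp [aStep, hx, hinr, hgt]
            rw [ha]
            dsimp only
            simp only [if_pos hgt']
            exact ⟨h4, h5, by push_cast; omega, by omega, le_rfl, by push_cast; omega,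
              seg_self l _, by simp, fun h => absurd rfl h, hseg, hlen⟩
          · have hgt' : ¬ p.2.length > (bestRun p.1).length := by omega
            have ha : aStep l st (k : Int) = (st.1, st.2.1, st.2.2.2, st.2.2.2) := by
              simp [aStep, hx, hinr, hgt]
            rw [ha]
            dsimp only
            simp only [if_neg hgt']
            exact ⟨h1, h2, by push_cast; omega, by omega, le_rfl, by push_cast; omega,
              seg_self l _, by simp, fun h => absurd rfl h, hbseg, hblen⟩

-- ===== VERDICT (by name: the statement is the Claim_ definition above) =====
theorem detLongestSequence_spec : Claim_equal_detLongestSequence := by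
  intro l _
  have h := inv l l.length le_rfl
  simp only [List.take_length] at h
  obtain ⟨h1, h2, h3, h4, h5, h6, hseg, hlen, hpend, hbseg, hblen⟩ := h
  show detLongestSequence l = detLongestSequence_alt l
  unfold detLongestSequence detLongestSequence_alt
  dsimp only
  set st := (PySem.List.pyRange 0 (l.length : Int) 1).foldl (aStep l) (0, 0, 0, 0) with hst
  set p := l.foldl bStep ([], []) with hp
  by_cases hcur : p.2 = []
  · have hps : st.2.2.1 = st.2.2.2 := by
      have : (p.2.length : Int) = 0 := by simp [hcur]
      omega
    have hnogt : ¬ (st.2.2.2 - st.2.2.1 > st.2.1 - st.1) := by omega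
    rw [if_neg hnogt, if_neg (by simp [hcur] : ¬ p.2 ≠ [])]
    dsimp only
    rw [PySem.List.slice_toNat _ _ _]
    exacts [hbseg, h1, by omega]
  · rw [if_pos hcur, bestRun_snoc]
    by_cases hgt : st.2.2.2 - st.2.2.1 > st.2.1 - st.1
    · have hgt' : p.2.length > (bestRun p.1).length := by omega
      rw [if_pos hgt, if_pos hgt']
      dsimp only
      rw [PySem.List.slice_toNat _ _ _]
      exacts [hseg, h4, by omega]
    · have hgt' : ¬ p.2.length > (bestRun p.1).length := by omega
      rw [if_neg hgt, if_neg hgt']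
      dsimp only
      rw [PySem.List.slice_toNat _ _ _]
      exacts [hbseg, h1, by omega]
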